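-- pv_equiv track=rewrite | github.com/StefanEvanghelides/AdventOfCode | 2024/22/py/a.py | compute_secret
-- ===== SOURCE A (Python) =====
-- def compute_secret(val: int, iterations: int) -> int:
-- 	res: int = val
--
-- 	for _ in range(iterations):
-- 		tmp = res * 64
-- 		res = (res ^ tmp ) % 16777216
-- 		tmp = res // 32
-- 		res = (res ^ tmp ) % 16777216
-- 		tmp = res * 2048
-- 		res = (res ^ tmp ) % 16777216
--
-- 	return res
-- ===== SOURCE B (Python) =====
-- def compute_secret(val: int, iterations: int) -> int:
--     def step(s: int) -> int:
--         s = (s ^ (s * 64)) % 16777216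
--         s = (s ^ (s // 32)) % 16777216
--         s = (s ^ (s * 2048)) % 16777216
--         return s
--
--     if iterations <= 0:
--         return val
--
--     # Brent's cycle detection: tortoise = step^(steps-lam)(val), hare = step^steps(val)
--     power = 1
--     lam = 1
--     tortoise = val
--     hare = step(val)
--     steps = 1
--     while hare != tortoise and steps < iterations:
--         if power == lam:
--             tortoise = hare
--             power *= 2
--             lam = 0
--         hare = step(hare)
--         lam += 1
--         steps += 1
--     if hare == tortoise:
--         # cycle of length lam reached; skip whole periods, walk the remainder
--         for _ in range((iterations - steps) % lam):
--             hare = step(hare)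
--     return hare
-- ===== Notes on version B (the rewrite author's own statement) =====
-- stated objective: alternative
-- what changed: B replaces A's blind n-step iteration by Brent's cycle detection: it finds a repeated state with O(1) memory, reduces the remaining iterations modulo the detected period, and walks only the remainder, so it performs at most min(iterations, a few periods) PRNG steps instead of always iterations.
import Mathlib
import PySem

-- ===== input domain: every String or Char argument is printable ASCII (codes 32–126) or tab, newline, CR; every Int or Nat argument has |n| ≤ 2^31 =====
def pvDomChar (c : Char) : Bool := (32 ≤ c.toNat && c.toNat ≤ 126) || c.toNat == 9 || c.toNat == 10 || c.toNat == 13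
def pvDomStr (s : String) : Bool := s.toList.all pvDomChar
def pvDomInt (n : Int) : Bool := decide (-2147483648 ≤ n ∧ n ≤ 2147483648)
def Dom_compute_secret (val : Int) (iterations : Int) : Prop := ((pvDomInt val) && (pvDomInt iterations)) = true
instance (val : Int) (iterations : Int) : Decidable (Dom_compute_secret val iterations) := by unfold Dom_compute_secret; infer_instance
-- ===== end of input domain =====

-- B replaces A's blind n-step iteration by Brent's cycle detection (repeat found with O(1) memory,
-- remaining iterations reduced mod the period); pays off only past the cycle length, so claimed as 'alternative'.


-- ===== PORT A =====
-- loop body of A's for-loop: the three xor/mod stages, exactly as in the Python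
def pvStepA (res : Int) : Int :=
  let tmp := res * 64
  let res := PySem.Int.mod (PySem.Int.bxor res tmp) 16777216
  let tmp := PySem.Int.floordiv res 32
  let res := PySem.Int.mod (PySem.Int.bxor res tmp) 16777216
  let tmp := res * 2048
  PySem.Int.mod (PySem.Int.bxor res tmp) 16777216

def compute_secret (val : Int) (iterations : Int) : Int :=
  (PySem.List.pyRange 0 iterations 1).foldl (fun res _ => pvStepA res) val

-- ===== PORT B =====
-- B's helper 'step' (same three stages, as in Source B)
def pvStepB (s : Int) : Int :=
  let s := PySem.Int.mod (PySem.Int.bxor s (s * 64)) 16777216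
  let s := PySem.Int.mod (PySem.Int.bxor s (PySem.Int.floordiv s 32)) 16777216
  PySem.Int.mod (PySem.Int.bxor s (s * 2048)) 16777216

-- the 'while hare != tortoise and steps < iterations' loop of Source B, followed by its
-- 'if hare == tortoise' remainder walk; fuel counts the remaining loop entries (iterations - steps)
def pvLoopB (iterations power lam tortoise hare steps : Int) : Nat → Int
  | 0 =>
    if hare = tortoise then
      (PySem.List.pyRange 0 (PySem.Int.mod (iterations - steps) lam) 1).foldl
        (fun t _ => pvStepB t) hare
    else hare
  | fuel + 1 =>
    if hare = tortoise then
      (PySem.List.pyRange 0 (PySem.Int.mod (iterations - steps) lam) 1).foldl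
        (fun t _ => pvStepB t) hare
    else if power = lam then
      pvLoopB iterations (power * 2) (0 + 1) hare (pvStepB hare) (steps + 1) fuel
    else
      pvLoopB iterations power (lam + 1) tortoise (pvStepB hare) (steps + 1) fuel

def compute_secret_alt (val : Int) (iterations : Int) : Int :=
  if iterations ≤ 0 then val
  else pvLoopB iterations 1 1 val (pvStepB val) 1 (iterations - 1).toNat

-- ===== PRECONDITION & SPEC =====
def Spec_compute_secret (val : Int) (iterations : Int) (out : Int) : Prop := out = compute_secret_alt val iterations
instance (val : Int) (iterations : Int) (out : Int) : Decidable (Spec_compute_secret val iterations out) := by unfold Spec_compute_secret; infer_instance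

-- ===== CLAIM (what is proved, stated in full; the proofs are below) =====
def Claim_equal_compute_secret : Prop := ∀ (val : Int) (iterations : Int), Dom_compute_secret val iterations → Spec_compute_secret val iterations (compute_secret val iterations)

-- ===== LEMMAS AND PROOFS =====

-- a foldl that ignores the list elements just iterates the function
theorem pv_foldl_const {α : Type} (f : Int → Int) (l : List α) (x : Int) :
    l.foldl (fun r _ => f r) x = f^[l.length] x := by
  induction l generalizing x with
  | nil => rfl
  | cons a t ih => simp [List.foldl, ih, Function.iterate_succ_apply]

theorem pvA_iterate (val iterations : Int) :
    compute_secret val iterations = pvStepA^[iterations.toNat] val := by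
  unfold compute_secret
  rw [pv_foldl_const, PySem.List.length_pyRange_one]
  norm_num

theorem pvStep_eq : pvStepA = pvStepB := rfl

-- periodicity: a repeat f^[j] x = f^[k] x (j < k) makes the orbit eventually periodic
theorem pv_periodic {f : Int → Int} {x : Int} {j k : Nat} (hjk : j < k)
    (hrep : f^[j] x = f^[k] x) :
    ∀ m, j ≤ m → f^[m + (k - j)] x = f^[m] x := by
  intro m hm
  have h1 : m + (k - j) = (m - j) + k := by omega
  have h2 : m = (m - j) + j := by omega
  rw [h1, Function.iterate_add_apply, ← hrep, ← Function.iterate_add_apply, ← h2]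

theorem pv_mod_reduce {f : Int → Int} {x : Int} {j k : Nat} (hjk : j < k)
    (hrep : f^[j] x = f^[k] x) :
    ∀ n, k ≤ n → f^[k + (n - k) % (k - j)] x = f^[n] x := by
  intro n
  induction n using Nat.strong_induction_on with
  | _ n ih =>
    intro hn
    set p := k - j with hp
    have hppos : 0 < p := by omega
    by_cases hbig : k + p ≤ n
    · have h1 : f^[n] x = f^[n - p] x := by
        have := pv_periodic hjk hrep (n - p) (by omega)
        rwa [Nat.sub_add_cancel (by omega)] at this
      have h2 : (n - k) % p = ((n - p) - k) % p := by
        have : n - k = ((n - p) - k) + p := by omega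
        rw [this, Nat.add_mod_right]
      rw [h2, h1]
      exact ih (n - p) (by omega) (by omega)
    · have hlt : n - k < p := by omega
      rw [Nat.mod_eq_of_lt hlt]
      congr 1
      omega

-- the remainder walk lands on f^[N] x once a repeat f^[t] x = f^[sn] x (t < sn ≤ N) is known
theorem pv_cycle_finish (N sn t : Nat) (x : Int) (ht : t < sn) (hsn : sn ≤ N)
    (hrep : pvStepB^[t] x = pvStepB^[sn] x) :
    (PySem.List.pyRange 0 (PySem.Int.mod ((N : Int) - (sn : Int)) ((sn : Int) - (t : Int))) 1).foldl
      (fun u _ => pvStepB u) (pvStepB^[sn] x) = pvStepB^[N] x := by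
  have hper : (sn : Int) - (t : Int) = ((sn - t : Nat) : Int) := by omega
  have hNk : (N : Int) - (sn : Int) = ((N - sn : Nat) : Int) := by omega
  rw [hper, hNk, PySem.Int.mod_natCast]
  rw [pv_foldl_const, PySem.List.length_pyRange_one]
  have hlen : ((((N - sn) % (sn - t) : Nat) : Int) - 0).toNat = (N - sn) % (sn - t) := by omega
  rw [hlen, ← Function.iterate_add_apply]
  have := pv_mod_reduce ht hrep N (by omega)
  rw [← this]
  congr 1
  omega

theorem pvLoopB_correct (N : Nat) (x : Int) :
    ∀ fuel (power lam tortoise hare steps : Int) (t sn : Nat),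
      fuel = N - sn → sn ≤ N → t < sn →
      lam = (sn : Int) - (t : Int) → steps = (sn : Int) →
      tortoise = pvStepB^[t] x → hare = pvStepB^[sn] x →
      pvLoopB (N : Int) power lam tortoise hare steps fuel = pvStepB^[N] x := by
  intro fuel
  induction fuel with
  | zero =>
    intro power lam tortoise hare steps t sn hfuel hsn ht hlam hsteps htor hhare
    unfold pvLoopB
    subst hlam hsteps htor hhare
    by_cases heq : pvStepB^[sn] x = pvStepB^[t] x
    · rw [if_pos heq]
      exact pv_cycle_finish N sn t x ht hsn heq.symm
    · rw [if_neg heq]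
      have : sn = N := by omega
      rw [this]
  | succ fuel ih =>
    intro power lam tortoise hare steps t sn hfuel hsn ht hlam hsteps htor hhare
    unfold pvLoopB
    subst hlam hsteps htor hhare
    have hsnN : sn < N := by omega
    by_cases heq : pvStepB^[sn] x = pvStepB^[t] x
    · rw [if_pos heq]
      exact pv_cycle_finish N sn t x ht hsn heq.symm
    · rw [if_neg heq]
      by_cases hpw : power = (sn : Int) - (t : Int)
      · rw [if_pos hpw]
        exact ih (power * 2) (0 + 1) (pvStepB^[sn] x) (pvStepB (pvStepB^[sn] x)) ((sn : Int) + 1)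
          sn (sn + 1) (by omega) (by omega) (by omega) (by push_cast; ring) (by push_cast; ring)
          rfl (Function.iterate_succ_apply' pvStepB sn x).symm
      · rw [if_neg hpw]
        exact ih power ((sn : Int) - (t : Int) + 1) (pvStepB^[t] x) (pvStepB (pvStepB^[sn] x))
          ((sn : Int) + 1) t (sn + 1) (by omega) (by omega) (by omega) (by push_cast; ring)
          (by push_cast; ring) rfl (Function.iterate_succ_apply' pvStepB sn x).symm

-- ===== VERDICT (by name: the statement is the Claim_ definition above) =====
theorem compute_secret_spec : Claim_equal_compute_secret := by
  intro val iterations _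
  unfold Spec_compute_secret compute_secret_alt
  rw [pvA_iterate, pvStep_eq]
  by_cases hpos : iterations ≤ 0
  · have h0 : iterations.toNat = 0 := by omega
    rw [if_pos hpos, h0]
    rfl
  · rw [if_neg hpos]
    obtain ⟨n, rfl⟩ : ∃ n : Nat, iterations = ((n + 1 : Nat) : Int) :=
      ⟨iterations.toNat - 1, by omega⟩
    have := pvLoopB_correct (n + 1) val n 1 1 val (pvStepB val) 1 0 1
      (by omega) (by omega) (by omega) (by omega) (by omega)
      rfl (Function.iterate_one pvStepB ▸ rfl)
    have harg : (((n + 1 : Nat) : Int) - 1).toNat = n := by omega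
    rw [harg]
    simpa using this.symm
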